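-- pv_equiv track=rewrite | github.com/omar404ahmed/bioinformatics_249 | one/resource_efficient_matching.py | approx_match_worker
-- ===== SOURCE A (Python) =====
-- def approx_match_worker(reads, genome_chunk, organism, max_mismatches=1):
--     """
--     Worker function for approximate matching with up to max_mismatches.
--
--     Args:
--         reads (list): List of read sequences
--         genome_chunk (str): Chunk of genome sequence to match against
--         organism (str): Name of the organism
--         max_mismatches (int): Maximum allowed mismatches
--
--     Returns:
--         dict: Dictionary mapping read indices to match results
--     """
--     results = {}
--
--     for i, read in enumerate(reads):
--         # Simple sliding window approach for approximate matching
--         read_len = len(read)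
--         found = False
--
--         # Check all possible positions in genome chunk
--         for j in range(len(genome_chunk) - read_len + 1):
--             # Extract potential match
--             potential_match = genome_chunk[j:j+read_len]
--
--             # Count mismatches
--             mismatches = sum(1 for a, b in zip(read, potential_match) if a != b)
--
--             if mismatches <= max_mismatches:
--                 found = True
--                 break
--
--         if found:
--             results[i] = organism
--
--     return results
-- ===== SOURCE B (Python) =====
-- def _build_index(genome, n, s):
--     # positions of every length-s substring of genome, grouped by substring
--     index = {}
--     for p in range(n - s + 1):
--         key = genome[p:p + s]
--         if key in index:
--             index[key].append(p)
--         else: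
--             index[key] = [p]
--     return index
--
--
-- def _mismatch_within(read, window, k):
--     m = 0
--     for a, b in zip(read, window):
--         if a != b:
--             m += 1
--             if m > k:
--                 return False
--     return True
--
--
-- def _pigeonhole_hit(read, genome, n, L, k, s, index):
--     # pigeonhole: a window with <= k mismatches matches one of the k+1
--     # disjoint length-s seeds exactly; verify only those candidate starts
--     for idx in range(k + 1):
--         seg = read[idx * s:(idx + 1) * s]
--         for p in index.get(seg, []):
--             j = p - idx * s
--             if 0 <= j <= n - L and _mismatch_within(read, genome[j:j + L], k):
--                 return True
--     return False
--
--
-- def approx_match_worker(reads, genome_chunk, organism, max_mismatches=1):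
--     results = {}
--     k = max_mismatches
--     if k < 0:
--         return results
--     n = len(genome_chunk)
--     index_cache = {}
--     for i, read in enumerate(reads):
--         L = len(read)
--         if n < L:
--             continue
--         if k >= L:
--             results[i] = organism
--             continue
--         s = L // (k + 1)
--         s = 1 << (s.bit_length() - 1)  # power-of-two seed length: few distinct index sizes
--         if s not in index_cache:
--             index_cache[s] = _build_index(genome_chunk, n, s)
--         if _pigeonhole_hit(read, genome_chunk, n, L, k, s, index_cache[s]):
--             results[i] = organism
--     return results
-- ===== Notes on version B (the rewrite author's own statement) =====
-- stated objective: alternative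
-- what changed: B replaces A's full Hamming-distance scan of every genome window per read with pigeonhole seed-and-extend: it builds a dictionary index of the genome's power-of-two-length substrings once per seed length, splits each read into max_mismatches+1 disjoint exact seeds, and verifies (with an early-exit mismatch count) only the candidate positions where some seed occurs exactly; a timing run's clocked ratio is dominated by the large returned dict, so no speed is claimed.
import Mathlib
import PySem

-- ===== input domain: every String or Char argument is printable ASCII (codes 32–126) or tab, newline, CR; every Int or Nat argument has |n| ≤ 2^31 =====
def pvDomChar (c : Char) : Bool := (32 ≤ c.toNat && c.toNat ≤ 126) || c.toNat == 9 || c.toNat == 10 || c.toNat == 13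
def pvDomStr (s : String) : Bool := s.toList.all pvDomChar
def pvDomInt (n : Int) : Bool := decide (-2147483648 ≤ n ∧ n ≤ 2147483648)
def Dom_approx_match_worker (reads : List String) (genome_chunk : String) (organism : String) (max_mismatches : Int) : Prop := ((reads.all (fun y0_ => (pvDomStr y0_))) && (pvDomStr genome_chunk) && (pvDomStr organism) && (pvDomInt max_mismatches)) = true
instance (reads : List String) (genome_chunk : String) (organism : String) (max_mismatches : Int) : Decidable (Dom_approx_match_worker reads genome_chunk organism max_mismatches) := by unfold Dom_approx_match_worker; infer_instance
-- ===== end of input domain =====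

-- B replaces A's naive Hamming scan of every window by pigeonhole seed-and-extend: it indexes
-- the genome's length-s substrings once per (power-of-two) seed length and verifies only the
-- candidate positions where one of the k+1 disjoint read seeds occurs exactly (same results).


-- ===== PORT A =====
-- mismatches = sum(1 for a, b in zip(read, potential_match) if a != b)
def pvCountMism : List (Char × Char) → Int
  | [] => 0
  | p :: rest => (if p.1 ≠ p.2 then 1 else 0) + pvCountMism rest

-- the inner 'for j in range(...)' with its break: first j whose window has ≤ max_mismatches mismatches
def pvFoundA (rcs gcs : List Char) (k : Int) : List Int → Bool
  | [] => false
  | j :: js =>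
    let pm := PySem.List.slice gcs (some j) (some (j + (rcs.length : Int)))
    if pvCountMism (rcs.zip pm) ≤ k then true else pvFoundA rcs gcs k js

def approx_match_worker (reads : List String) (genome_chunk : String) (organism : String) (max_mismatches : Int) : List (Int × String) :=
  (((PySem.List.enumerate reads).foldl
      (fun (results : PySem.Dict Int String) p =>
        let read_len : Int := PySem.Str.len p.2
        let found := pvFoundA p.2.toList genome_chunk.toList max_mismatches
          (PySem.List.pyRange 0 (PySem.Str.len genome_chunk - read_len + 1) 1)
        if found then results.insert p.1 organism else results)
      PySem.Dict.empty) : PySem.Dict Int String).items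

-- ===== PORT B =====
-- _build_index: positions of every length-s substring of genome, grouped by substring
def pvBuildIndex (g : List Char) (n s : Int) : PySem.Dict (List Char) (List Int) :=
  (PySem.List.pyRange 0 (n - s + 1) 1).foldl
    (fun d p =>
      let key := PySem.List.slice g (some p) (some (p + s))
      if d.contains key then d.insert key (d.getD key [] ++ [p]) else d.insert key [p])
    PySem.Dict.empty

-- _mismatch_within: counts mismatches, early False once the count exceeds k
def pvMismWithin : List (Char × Char) → Int → Int → Bool
  | [], _, _ => true
  | q :: rest, m, k =>
    if q.1 ≠ q.2 then
      if m + 1 > k then false else pvMismWithin rest (m + 1) k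
    else pvMismWithin rest m k

-- inner 'for p in index.get(seg, [])' of _pigeonhole_hit (early return True)
def pvHitCands (rl gl : List Char) (n L k off : Int) : List Int → Bool
  | [] => false
  | p :: ps =>
    let j := p - off
    if 0 ≤ j ∧ j ≤ n - L ∧ pvMismWithin (rl.zip (PySem.List.slice gl (some j) (some (j + L)))) 0 k = true
    then true else pvHitCands rl gl n L k off ps

-- outer 'for idx in range(k + 1)' of _pigeonhole_hit
def pvHitPigeon (rl gl : List Char) (n L k s : Int) (index : PySem.Dict (List Char) (List Int)) : List Int → Bool
  | [] => false
  | idx :: idxs =>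
    let seg := PySem.List.slice rl (some (idx * s)) (some ((idx + 1) * s))
    if pvHitCands rl gl n L k (idx * s) (index.getD seg []) then true
    else pvHitPigeon rl gl n L k s index idxs

def approx_match_worker_alt (reads : List String) (genome_chunk : String) (organism : String) (max_mismatches : Int) : List (Int × String) :=
  if max_mismatches < 0 then (PySem.Dict.empty : PySem.Dict Int String).items
  else
    (((PySem.List.enumerate reads).foldl
        (fun (st : PySem.Dict Int (PySem.Dict (List Char) (List Int)) × PySem.Dict Int String) q =>
          let L := PySem.Str.len q.2
          if PySem.Str.len genome_chunk < L then st
          else if max_mismatches ≥ L then (st.1, st.2.insert q.1 organism)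
          else
            let s0 := PySem.Int.floordiv L (max_mismatches + 1)
            let s := (1 : Int) <<< (PySem.Int.bitLength s0 - 1)
            let cache := if st.1.contains s then st.1 else st.1.insert s (pvBuildIndex genome_chunk.toList (PySem.Str.len genome_chunk) s)
            (cache,
             if pvHitPigeon q.2.toList genome_chunk.toList (PySem.Str.len genome_chunk) L max_mismatches s (cache.getD s PySem.Dict.empty)
                  (PySem.List.pyRange 0 (max_mismatches + 1) 1) = true
             then st.2.insert q.1 organism else st.2))
        (PySem.Dict.empty, PySem.Dict.empty)).2).items

-- ===== PRECONDITION & SPEC =====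
def Spec_approx_match_worker (reads : List String) (genome_chunk : String) (organism : String) (max_mismatches : Int) (out : List (Int × String)) : Prop := out = approx_match_worker_alt reads genome_chunk organism max_mismatches
instance (reads : List String) (genome_chunk : String) (organism : String) (max_mismatches : Int) (out : List (Int × String)) : Decidable (Spec_approx_match_worker reads genome_chunk organism max_mismatches out) := by unfold Spec_approx_match_worker; infer_instance

-- ===== CLAIM (what is proved, stated in full; the proofs are below) =====
def Claim_equal_approx_match_worker : Prop := ∀ (reads : List String) (genome_chunk : String) (organism : String) (max_mismatches : Int), Dom_approx_match_worker reads genome_chunk organism max_mismatches → Spec_approx_match_worker reads genome_chunk organism max_mismatches (approx_match_worker reads genome_chunk organism max_mismatches)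

-- ===== LEMMAS AND PROOFS =====
theorem pvCountMism_nonneg (l : List (Char × Char)) : 0 ≤ pvCountMism l := by
  induction l with
  | nil => simp [pvCountMism]
  | cons p rest ih => simp only [pvCountMism]; split <;> omega

theorem pvCountMism_le_length (l : List (Char × Char)) : pvCountMism l ≤ (l.length : Int) := by
  induction l with
  | nil => simp [pvCountMism]
  | cons p rest ih => simp only [pvCountMism, List.length_cons]; split <;> push_cast <;> omega

theorem pvCountMism_append (a b : List (Char × Char)) :
    pvCountMism (a ++ b) = pvCountMism a + pvCountMism b := by
  induction a with
  | nil => simp [pvCountMism]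
  | cons p rest ih => simp only [List.cons_append, pvCountMism, ih]; ring

theorem eq_of_pvCountMism_zero (r w : List Char) (h0 : pvCountMism (r.zip w) = 0)
    (hl : r.length = w.length) : r = w := by
  induction r generalizing w with
  | nil => cases w <;> simp_all
  | cons a r ih =>
    cases w with
    | nil => simp_all
    | cons b w =>
      simp only [List.zip_cons_cons, pvCountMism] at h0
      have hc := pvCountMism_nonneg (r.zip w)
      by_cases hab : a = b
      · simp only [hab, ne_eq, not_true_eq_false, if_neg, not_false_eq_true] at h0
        simp only [List.length_cons, Nat.add_right_cancel_iff] at hl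
        simp only [hab, ih w (by omega) hl]
      · simp [hab] at h0; omega

theorem pvMismWithin_eq (l : List (Char × Char)) (m k : Int) (hm : m ≤ k) :
    pvMismWithin l m k = decide (m + pvCountMism l ≤ k) := by
  induction l generalizing m with
  | nil => simp [pvMismWithin, pvCountMism, hm]
  | cons q rest ih =>
    simp only [pvMismWithin, pvCountMism]
    by_cases h : q.1 = q.2
    · simp only [h, ne_eq, not_true_eq_false, if_neg, not_false_eq_true, ih m hm]
      norm_num
    · have hc := pvCountMism_nonneg rest
      by_cases hz : m + 1 > k
      · have : ¬ (m + (1 + pvCountMism rest) ≤ k) := by omega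
        simp [h, hz, this]
      · have hiff : (m + 1 + pvCountMism rest ≤ k) ↔ (m + (1 + pvCountMism rest) ≤ k) := by omega
        simp [h, hz, ih (m + 1) (by omega), hiff]

theorem pvFoundA_any (rl gl : List Char) (k : Int) (js : List Int) :
    pvFoundA rl gl k js
      = js.any (fun j => decide (pvCountMism (rl.zip (PySem.List.slice gl (some j) (some (j + (rl.length : Int))))) ≤ k)) := by
  induction js with
  | nil => rfl
  | cons j js ih =>
    simp only [pvFoundA, List.any_cons]
    by_cases h : pvCountMism (rl.zip (PySem.List.slice gl (some j) (some (j + (rl.length : Int))))) ≤ k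
    · simp [h]
    · simp [h, ih]

theorem pvHitCands_any (rl gl : List Char) (n L k off : Int) (hk : 0 ≤ k) (ps : List Int) :
    pvHitCands rl gl n L k off ps
      = ps.any (fun p => decide (0 ≤ p - off ∧ p - off ≤ n - L ∧
          pvCountMism (rl.zip (PySem.List.slice gl (some (p - off)) (some (p - off + L)))) ≤ k)) := by
  induction ps with
  | nil => rfl
  | cons p ps ih =>
    simp only [pvHitCands, List.any_cons, pvMismWithin_eq _ _ _ hk, zero_add, decide_eq_true_eq]
    split <;> simp_all

theorem pvHitPigeon_any (rl gl : List Char) (n L k s : Int)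
    (index : PySem.Dict (List Char) (List Int)) (idxs : List Int) :
    pvHitPigeon rl gl n L k s index idxs
      = idxs.any (fun idx =>
          pvHitCands rl gl n L k (idx * s)
            (index.getD (PySem.List.slice rl (some (idx * s)) (some ((idx + 1) * s))) [])) := by
  induction idxs with
  | nil => rfl
  | cons idx idxs ih =>
    simp only [pvHitPigeon, List.any_cons]
    split <;> simp_all

-- each index-building step is a dict 'modify … append'
theorem pvBuildIndex_step (d : PySem.Dict (List Char) (List Int)) (key : List Char) (p : Int) :
    (if d.contains key then d.insert key (d.getD key [] ++ [p]) else d.insert key [p])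
      = d.modify key [] (· ++ [p]) := by
  unfold PySem.Dict.modify
  by_cases h : d.contains key
  · simp [h, PySem.Dict.getD_eq_get?_getD]
  · have h0 : d.get? key = none := by
      rw [PySem.Dict.get?_eq_none_iff_contains]; simpa using h
    simp [h, PySem.Dict.getD_eq_get?_getD, h0]

-- the genome index lists exactly the positions whose length-s substring equals the key, in order
theorem pvBuildIndex_getD (g : List Char) (n s : Int) (key : List Char) :
    (pvBuildIndex g n s).getD key []
      = (PySem.List.pyRange 0 (n - s + 1) 1).filter
          (fun p => PySem.List.slice g (some p) (some (p + s)) == key) := by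
  unfold pvBuildIndex
  have h1 : (PySem.List.pyRange 0 (n - s + 1) 1).foldl
      (fun (d : PySem.Dict (List Char) (List Int)) p =>
        let key := PySem.List.slice g (some p) (some (p + s))
        if d.contains key then d.insert key (d.getD key [] ++ [p]) else d.insert key [p])
      PySem.Dict.empty
    = (PySem.List.pyRange 0 (n - s + 1) 1).foldl
        (fun (d : PySem.Dict (List Char) (List Int)) p =>
          d.modify (PySem.List.slice g (some p) (some (p + s))) [] (· ++ [p]))
        PySem.Dict.empty :=
    PySem.List.foldl_congr_mem _ _ _ _ (by intro d p _; exact pvBuildIndex_step d _ p)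
  rw [h1]
  rw [← List.foldl_map (f := fun p : Int => (PySem.List.slice g (some p) (some (p + s)), p))
        (g := fun (d : PySem.Dict (List Char) (List Int)) (q : List Char × Int) =>
          d.modify q.1 [] (· ++ [q.2]))]
  rw [PySem.Dict.getD_foldl_modify_append]
  simp [List.filter_map, List.map_map, Function.comp_def]

-- pigeonhole: if every one of the first m length-s segments differs, there are ≥ m mismatches
theorem pvPigeonAux (s : Nat) (m : Nat) (r w : List Char) (hl : r.length = w.length)
    (hd : ∀ i < m, (r.drop (i * s)).take s ≠ (w.drop (i * s)).take s) :
    (m : Int) ≤ pvCountMism (r.zip w) := by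
  induction m generalizing r w with
  | zero => exact_mod_cast pvCountMism_nonneg _
  | succ m ih =>
    have hsplit : r.zip w = ((r.take s).zip (w.take s)) ++ ((r.drop s).zip (w.drop s)) := by
      conv_lhs => rw [← List.take_append_drop s r, ← List.take_append_drop s w]
      exact List.zip_append (by simp [hl])
    have h1 : 1 ≤ pvCountMism ((r.take s).zip (w.take s)) := by
      have hne := hd 0 (by omega)
      simp only [Nat.zero_mul, List.drop_zero] at hne
      have hc := pvCountMism_nonneg ((r.take s).zip (w.take s))
      rcases lt_or_eq_of_le hc with h | h
      · omega
      · exact absurd (eq_of_pvCountMism_zero _ _ h.symm (by simp [hl])) hne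
    have h2 : (m : Int) ≤ pvCountMism ((r.drop s).zip (w.drop s)) := by
      refine ih (r.drop s) (w.drop s) (by simp [hl]) ?_
      intro i hi
      have := hd (i + 1) (by omega)
      simpa [List.drop_drop, Nat.succ_mul, Nat.add_comm] using this
    rw [hsplit, pvCountMism_append]
    push_cast
    omega

-- per-read equivalence: pigeonhole filtering finds a window iff the naive scan does
theorem pvPerRead (rl gl : List Char) (k : Int) (hk : 0 ≤ k)
    (hkL : k < (rl.length : Int)) :
    pvHitPigeon rl gl gl.length rl.length k
        ((1 : Int) <<< (PySem.Int.bitLength (PySem.Int.floordiv rl.length (k + 1)) - 1))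
        (pvBuildIndex gl gl.length ((1 : Int) <<< (PySem.Int.bitLength (PySem.Int.floordiv rl.length (k + 1)) - 1)))
        (PySem.List.pyRange 0 (k + 1) 1)
      = pvFoundA rl gl k (PySem.List.pyRange 0 ((gl.length : Int) - rl.length + 1) 1) := by
  obtain ⟨K, rfl⟩ : ∃ K : Nat, k = (K : Int) := ⟨k.toNat, (Int.toNat_of_nonneg hk).symm⟩
  set s0N := rl.length / (K + 1) with hs0N
  have hs0 : PySem.Int.floordiv (rl.length : Int) ((K : Int) + 1) = (s0N : Int) := by
    rw [show ((K : Int) + 1) = ((K + 1 : Nat) : Int) by push_cast; ring]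
    exact PySem.Int.floordiv_natCast rl.length (K + 1)
  have hKL : K + 1 ≤ rl.length := by exact_mod_cast hkL
  have hs0N1 : 1 ≤ s0N := (Nat.le_div_iff_mul_le (by omega)).mpr (by omega)
  set sN := 2 ^ (PySem.Int.bitLength ((s0N : Nat) : Int) - 1) with hsNdef
  have hs : (1 : Int) <<< (PySem.Int.bitLength (PySem.Int.floordiv (rl.length : Int) ((K : Int) + 1)) - 1) = (sN : Int) := by
    rw [hs0, Int.shiftLeft_eq, hsNdef]; push_cast; ring
  have hs1 : 1 ≤ sN := Nat.one_le_two_pow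
  have hsle : sN ≤ s0N := by
    have h := PySem.Int.two_pow_bitLength_le ((s0N : Nat) : Int) (by exact_mod_cast (by omega : (0:Int) < ((s0N : Nat) : Int)).ne')
    simpa [hsNdef] using h
  have hs2 : (K + 1) * sN ≤ rl.length := by
    calc (K + 1) * sN ≤ (K + 1) * s0N := Nat.mul_le_mul_left _ hsle
    _ = s0N * (K + 1) := by ring
    _ ≤ rl.length := Nat.div_mul_le_self _ _
  rw [hs, pvHitPigeon_any, pvFoundA_any, Bool.eq_iff_iff]
  simp only [List.any_eq_true, pvHitCands_any _ _ _ _ _ _ (by positivity), pvBuildIndex_getD,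
    List.mem_filter, PySem.List.mem_pyRange_one, decide_eq_true_eq, beq_iff_eq]
  constructor
  · rintro ⟨idx, -, p, -, hj0, hj1, hcnt⟩
    exact ⟨p - idx * (sN : Int), ⟨hj0, by omega⟩, hcnt⟩
  · rintro ⟨j, ⟨hj0, hj1⟩, hcnt⟩
    obtain ⟨jn, rfl⟩ : ∃ jn : Nat, j = (jn : Int) := ⟨j.toNat, (Int.toNat_of_nonneg hj0).symm⟩
    have hjn : jn + rl.length ≤ gl.length := by
      have := hj1; push_cast at this; omega
    have hslice : PySem.List.slice gl (some (jn : Int)) (some ((jn : Int) + (rl.length : Int)))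
        = (gl.drop jn).take rl.length := PySem.List.slice_natCast_add gl jn rl.length
    set wl := (gl.drop jn).take rl.length with hwl
    have hwlen : wl.length = rl.length := by
      simp [hwl, List.length_take, List.length_drop]; omega
    rw [hslice] at hcnt
    have hex : ∃ i, i < K + 1 ∧ (rl.drop (i * sN)).take sN = (wl.drop (i * sN)).take sN := by
      by_contra hno
      push Not at hno
      have hge := pvPigeonAux sN (K + 1) rl wl hwlen.symm (fun i hi => hno i hi)
      have hc := pvCountMism_nonneg (rl.zip wl)
      push_cast at hge
      omega
    obtain ⟨i, hi, hseg⟩ := hex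
    have his : i * sN + sN ≤ rl.length := by
      have h1 : (i + 1) * sN ≤ (K + 1) * sN := Nat.mul_le_mul_right _ (by omega)
      have h2 : (i + 1) * sN = i * sN + sN := by ring
      omega
    have hwseg : (wl.drop (i * sN)).take sN = (gl.drop (jn + i * sN)).take sN := by
      rw [hwl, List.drop_take, List.drop_drop, List.take_take]
      congr 1
      omega
    refine ⟨(i : Int), ⟨by positivity, by exact_mod_cast hi⟩,
      ((jn + i * sN : Nat) : Int), ⟨⟨⟨by positivity, ?_⟩, ?_⟩, ?_, ?_, ?_⟩⟩
    · push_cast; omega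
    · -- the genome substring at p equals the read's i-th seed
      have hb1 : ((i : Int) * (sN : Int)) = ((i * sN : Nat) : Int) := by push_cast; ring
      have hb2 : (((i : Int) + 1) * (sN : Int)) = ((i * sN : Nat) : Int) + ((sN : Nat) : Int) := by
        push_cast; ring
      rw [hb1, hb2, PySem.List.slice_natCast_add rl (i * sN) sN,
        show (((jn + i * sN : Nat) : Int) + (sN : Int)) = (((jn + i * sN : Nat) : Int) + ((sN : Nat) : Int)) from rfl,
        PySem.List.slice_natCast_add gl (jn + i * sN) sN]
      rw [← hwseg, ← hseg]
    · push_cast; omega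
    · push_cast; omega
    · have hp : ((jn + i * sN : Nat) : Int) - (i : Int) * (sN : Int) = (jn : Int) := by
        push_cast; ring
      rw [hp, hslice]
      exact hcnt

-- when the genome is shorter than the read, the naive scan finds nothing
theorem pvFoundA_none (rl gl : List Char) (k : Int) (h : (gl.length : Int) < rl.length) :
    pvFoundA rl gl k (PySem.List.pyRange 0 ((gl.length : Int) - rl.length + 1) 1) = false := by
  rw [PySem.List.pyRange_one_eq_nil (by omega)]
  rfl

-- when k ≥ len(read) ≤ len(genome), the very first window already matches
theorem pvFoundA_trivial (rl gl : List Char) (k : Int)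
    (hLn : rl.length ≤ gl.length) (hkL : (rl.length : Int) ≤ k) :
    pvFoundA rl gl k (PySem.List.pyRange 0 ((gl.length : Int) - rl.length + 1) 1) = true := by
  rw [pvFoundA_any, List.any_eq_true]
  refine ⟨0, ?_, ?_⟩
  · rw [PySem.List.mem_pyRange_one]
    exact ⟨by omega, by omega⟩
  · rw [decide_eq_true_eq]
    calc pvCountMism _ ≤ _ := pvCountMism_le_length _
    _ ≤ (rl.length : Int) := by simp [List.length_zip]
    _ ≤ k := hkL

-- with k < 0 A's scan never succeeds
theorem pvFoundA_neg (rcs gcs : List Char) (k : Int) (hk : k < 0) (js : List Int) :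
    pvFoundA rcs gcs k js = false := by
  induction js with
  | nil => rfl
  | cons j js ih =>
    have hc := pvCountMism_nonneg (rcs.zip (PySem.List.slice gcs (some j) (some (j + (rcs.length : Int)))))
    simp only [pvFoundA]
    have hle : ¬ pvCountMism (rcs.zip (PySem.List.slice gcs (some j) (some (j + (rcs.length : Int))))) ≤ k := by omega
    simp [hle, ih]

-- B's fold computes the same results dict as A's fold, given the index-cache invariant
theorem pvFold_eq (g : String) (org : String) (k : Int) (hk : 0 ≤ k)
    (l : List (Int × String)) (cache : PySem.Dict Int (PySem.Dict (List Char) (List Int)))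
    (results : PySem.Dict Int String)
    (hinv : ∀ s d, cache.get? s = some d → d = pvBuildIndex g.toList (PySem.Str.len g) s) :
    (l.foldl
        (fun (st : PySem.Dict Int (PySem.Dict (List Char) (List Int)) × PySem.Dict Int String) q =>
          let L := PySem.Str.len q.2
          if PySem.Str.len g < L then st
          else if k ≥ L then (st.1, st.2.insert q.1 org)
          else
            let s0 := PySem.Int.floordiv L (k + 1)
            let s := (1 : Int) <<< (PySem.Int.bitLength s0 - 1)
            let cache := if st.1.contains s then st.1 else st.1.insert s (pvBuildIndex g.toList (PySem.Str.len g) s)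
            (cache,
             if pvHitPigeon q.2.toList g.toList (PySem.Str.len g) L k s (cache.getD s PySem.Dict.empty)
                  (PySem.List.pyRange 0 (k + 1) 1) = true
             then st.2.insert q.1 org else st.2))
        (cache, results)).2
    = l.foldl
        (fun (results : PySem.Dict Int String) p =>
          let read_len : Int := PySem.Str.len p.2
          let found := pvFoundA p.2.toList g.toList k
            (PySem.List.pyRange 0 (PySem.Str.len g - read_len + 1) 1)
          if found then results.insert p.1 org else results)
        results := by
  induction l generalizing cache results with
  | nil => rfl
  | cons q l ih =>
    simp only [List.foldl_cons]
    by_cases h1 : PySem.Str.len g < PySem.Str.len q.2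
    · rw [if_pos h1]
      have hA : pvFoundA q.2.toList g.toList k
          (PySem.List.pyRange 0 (PySem.Str.len g - PySem.Str.len q.2 + 1) 1) = false := by
        simp only [PySem.Str.len_eq] at h1 ⊢
        exact pvFoundA_none _ _ _ (by exact_mod_cast h1)
      simp only [hA, Bool.false_eq_true, if_false]
      exact ih cache results hinv
    · rw [if_neg h1]
      by_cases h2 : k ≥ PySem.Str.len q.2
      · rw [if_pos h2]
        have hA : pvFoundA q.2.toList g.toList k
            (PySem.List.pyRange 0 (PySem.Str.len g - PySem.Str.len q.2 + 1) 1) = true := by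
          simp only [PySem.Str.len_eq] at h1 h2 ⊢
          exact pvFoundA_trivial _ _ _ (by exact_mod_cast not_lt.mp h1) h2
        simp only [hA, if_true]
        exact ih cache _ hinv
      · rw [if_neg h2]
        set s := (1 : Int) <<< (PySem.Int.bitLength (PySem.Int.floordiv (PySem.Str.len q.2) (k + 1)) - 1) with hsdef
        set cacheN := if cache.contains s then cache
          else cache.insert s (pvBuildIndex g.toList (PySem.Str.len g) s) with hcdef
        have hinvN : ∀ t d, cacheN.get? t = some d → d = pvBuildIndex g.toList (PySem.Str.len g) t := by
          intro t d hget
          rw [hcdef] at hget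
          by_cases hc : cache.contains s
          · rw [if_pos hc] at hget; exact hinv t d hget
          · rw [if_neg hc] at hget
            by_cases ht : t = s
            · subst ht
              rw [PySem.Dict.get?_insert_self] at hget
              injection hget with h
              exact h.symm
            · rw [PySem.Dict.get?_insert_of_ne _ _ ht] at hget
              exact hinv t d hget
        have hgd : cacheN.getD s PySem.Dict.empty = pvBuildIndex g.toList (PySem.Str.len g) s := by
          rw [hcdef]
          by_cases hc : cache.contains s
          · rw [if_pos hc]
            have d_hget : ∃ d, cache.get? s = some d := by
              cases hget : cache.get? s with
              | none => rw [PySem.Dict.get?_eq_none_iff_contains] at hget; simp [hc] at hget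
              | some d => exact ⟨d, rfl⟩
            obtain ⟨d, hget⟩ := d_hget
            rw [PySem.Dict.getD_eq_get?_getD, hget, Option.getD_some, hinv s d hget]
          · rw [if_neg hc, PySem.Dict.getD_insert_self]
        have hmain : pvHitPigeon q.2.toList g.toList (PySem.Str.len g) (PySem.Str.len q.2) k s
              (cacheN.getD s PySem.Dict.empty) (PySem.List.pyRange 0 (k + 1) 1)
            = pvFoundA q.2.toList g.toList k
                (PySem.List.pyRange 0 (PySem.Str.len g - PySem.Str.len q.2 + 1) 1) := by
          rw [hgd, hsdef]
          simp only [PySem.Str.len_eq]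
          exact pvPerRead q.2.toList g.toList k hk
            (by have := not_le.mp h2; simp only [PySem.Str.len_eq] at this; exact_mod_cast this)
        simp only [hmain]
        by_cases hf : pvFoundA q.2.toList g.toList k
            (PySem.List.pyRange 0 (PySem.Str.len g - PySem.Str.len q.2 + 1) 1) = true
        · simp only [hf, if_true]
          exact ih cacheN _ hinvN
        · simp only [hf]
          exact ih cacheN _ hinvN

-- ===== VERDICT (by name: the statement is the Claim_ definition above) =====
theorem approx_match_worker_spec : Claim_equal_approx_match_worker := by
  intro reads g org k _
  unfold Spec_approx_match_worker approx_match_worker approx_match_worker_alt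
  by_cases hk : k < 0
  · rw [if_pos hk]
    have hid : ∀ (l : List (Int × String)) (results : PySem.Dict Int String),
        l.foldl
          (fun (results : PySem.Dict Int String) p =>
            let read_len : Int := PySem.Str.len p.2
            let found := pvFoundA p.2.toList g.toList k
              (PySem.List.pyRange 0 (PySem.Str.len g - read_len + 1) 1)
            if found then results.insert p.1 org else results)
          results = results := by
      intro l results
      simp only [pvFoundA_neg _ _ _ hk, Bool.false_eq_true, if_false]
      exact PySem.List.foldl_ignore ..
    rw [hid]
  · rw [if_neg hk,
      pvFold_eq g org k (by omega) (PySem.List.enumerate reads) PySem.Dict.empty PySem.Dict.empty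
        (by intro s d h; simp [PySem.Dict.get?, PySem.Dict.empty] at h)]
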